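-- pv_equiv track=rewrite | github.com/risi-kondor/GElib | python/src/gelib/SO3vec.py | DiagCGproductType
-- ===== SOURCE A (Python) =====
-- def DiagCGproductType(x, y, maxl=-1):
--     if maxl == -1:
--         maxl = len(x)+len(y)-2
--     maxl = min(maxl, len(x)+len(y)-2)
--     r = [0]*(maxl+1)
--     for l1 in range(0, len(x)):
--         for l2 in range(0, len(y)):
--             for l in range(abs(l1-l2), min(l1+l2, maxl)+1):
--                 r[l] += x[l1]
--     return r
-- ===== SOURCE B (Python) =====
-- def DiagCGproductType(x, y, maxl=-1):
--     L = len(x) + len(y) - 2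
--     if maxl == -1:
--         maxl = L
--     M = min(maxl, L)
--     if M < 0:
--         return []
--     d = [0] * (M + 2)
--     for l1 in range(len(x)):
--         v = x[l1]
--         for l2 in range(len(y)):
--             lo = abs(l1 - l2)
--             hi = min(l1 + l2, M)
--             if lo <= hi:
--                 d[lo] += v
--                 d[hi + 1] -= v
--     out = []
--     s = 0
--     for i in range(M + 1):
--         s += d[i]
--         out.append(s)
--     return out
-- ===== Notes on version B (the rewrite author's own statement) =====
-- stated objective: faster
-- what changed: Replaced the innermost per-index accumulation loop (r[l] += x[l1] for every l in the range) by O(1) difference-array range updates per (l1,l2) pair followed by a single prefix-sum pass.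
import Mathlib
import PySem

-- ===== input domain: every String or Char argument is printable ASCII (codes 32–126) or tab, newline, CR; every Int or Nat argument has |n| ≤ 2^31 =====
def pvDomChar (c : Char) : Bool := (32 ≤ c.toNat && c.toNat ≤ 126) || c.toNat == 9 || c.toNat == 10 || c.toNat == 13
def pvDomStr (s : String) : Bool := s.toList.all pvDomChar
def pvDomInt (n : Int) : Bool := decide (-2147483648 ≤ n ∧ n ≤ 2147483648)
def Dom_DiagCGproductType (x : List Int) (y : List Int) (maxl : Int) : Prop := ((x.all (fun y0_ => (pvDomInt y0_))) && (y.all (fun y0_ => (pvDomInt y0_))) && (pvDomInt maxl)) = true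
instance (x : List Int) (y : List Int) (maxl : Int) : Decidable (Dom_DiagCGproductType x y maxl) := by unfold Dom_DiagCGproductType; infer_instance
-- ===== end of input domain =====

-- B replaces A's innermost per-index accumulation loop by O(1) difference-array range updates
-- followed by one prefix-sum pass (the objective: asymptotically fewer additions).
-- Both programs are total; A's list writes r[l] += x[l1] are always in range, so the
-- set/getD-based port below is exact.

-- ===== PORT A =====
-- r[l] += x[l1]  (l and l1 always in range where A executes it, so set/getD are exact)
def pvAddAt (r : List Int) (i : Nat) (v : Int) : List Int := r.set i (r.getD i 0 + v)

def DiagCGproductType (x : List Int) (y : List Int) (maxl : Int) : List Int :=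
  let maxl1 : Int := if maxl = -1 then (x.length : Int) + (y.length : Int) - 2 else maxl
  let maxl2 : Int := min maxl1 ((x.length : Int) + (y.length : Int) - 2)
  let r0 : List Int := List.replicate (maxl2 + 1).toNat 0
  (List.range x.length).foldl (fun r (l1 : Nat) =>
    (List.range y.length).foldl (fun r (l2 : Nat) =>
      -- range(abs(l1-l2), min(l1+l2, maxl)+1): lower end is a Nat, count clamps at 0 like Python's empty range
      (List.range' (((l1 : Int) - (l2 : Int)).natAbs)
          ((min ((l1 : Int) + (l2 : Int)) maxl2 + 1 - ((((l1 : Int) - (l2 : Int)).natAbs : Int))).toNat)).foldl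
        (fun r l => pvAddAt r l (x.getD l1 0)) r) r) r0

-- ===== PORT B =====
-- d[lo] += v; d[hi+1] -= v  (both indices in range whenever the guard lo ≤ hi holds)
def pvDiffAdd (d : List Int) (lo : Nat) (hi1 : Nat) (v : Int) : List Int :=
  pvAddAt (pvAddAt d lo v) hi1 (-v)

def DiagCGproductType_alt (x : List Int) (y : List Int) (maxl : Int) : List Int :=
  let L : Int := (x.length : Int) + (y.length : Int) - 2
  let maxl' : Int := if maxl = -1 then L else maxl
  let M : Int := min maxl' L
  if M < 0 then []
  else
    let d : List Int := (List.range x.length).foldl (fun d (l1 : Nat) =>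
      let v := x.getD l1 0
      (List.range y.length).foldl (fun d (l2 : Nat) =>
        let lo := ((l1 : Int) - (l2 : Int)).natAbs
        let hi := min ((l1 : Int) + (l2 : Int)) M
        if (lo : Int) ≤ hi then pvDiffAdd d lo (hi + 1).toNat v else d) d)
      (List.replicate (M + 2).toNat 0)
    ((List.range (M + 1).toNat).foldl
      (fun (p : List Int × Int) i => (p.1 ++ [p.2 + d.getD i 0], p.2 + d.getD i 0)) ([], 0)).1

-- ===== PRECONDITION & SPEC =====
def Spec_DiagCGproductType (x : List Int) (y : List Int) (maxl : Int) (out : List Int) : Prop := out = DiagCGproductType_alt x y maxl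
instance (x : List Int) (y : List Int) (maxl : Int) (out : List Int) : Decidable (Spec_DiagCGproductType x y maxl out) := by unfold Spec_DiagCGproductType; infer_instance

-- ===== CLAIM (what is proved, stated in full; the proofs are below) =====
def Claim_equal_DiagCGproductType : Prop := ∀ (x : List Int) (y : List Int) (maxl : Int), Dom_DiagCGproductType x y maxl → Spec_DiagCGproductType x y maxl (DiagCGproductType x y maxl)

-- ===== LEMMAS AND PROOFS =====

/-- folding preserves an invariant of the accumulator -/
theorem pvFoldlInv {α γ : Type} (P : α → Prop) (f : α → γ → α)
    (h : ∀ a c, P a → P (f a c)) : ∀ (l : List γ) (a : α), P a → P (l.foldl f a) := by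
  intro l
  induction l with
  | nil => intro a ha; exact ha
  | cons c t ih => intro a ha; exact ih (f a c) (h a c ha)

/-- two folds over the same list preserve a relation between their accumulators -/
theorem pvFoldlRel {α β γ : Type} (R : α → β → Prop) (f : α → γ → α) (g : β → γ → β)
    (h : ∀ a b c, R a b → R (f a c) (g b c)) :
    ∀ (l : List γ) (a : α) (b : β), R a b → R (l.foldl f a) (l.foldl g b) := by
  intro l
  induction l with
  | nil => intro a b hab; exact hab
  | cons c t ih => intro a b hab; exact ih (f a c) (g b c) (h a b c hab)

theorem pvAddAt_length (r : List Int) (i : Nat) (v : Int) : (pvAddAt r i v).length = r.length := by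
  simp [pvAddAt]

theorem pvAddAt_getD (r : List Int) (j i : Nat) (v : Int) :
    (pvAddAt r j v).getD i 0 = r.getD i 0 + if i = j ∧ j < r.length then v else 0 := by
  unfold pvAddAt
  by_cases hj : j < r.length
  · by_cases hij : i = j
    · subst hij
      simp [List.getD, hj]
    · have hji : j ≠ i := fun h => hij h.symm
      simp [List.getD_eq_getElem?_getD, hji, hij]
  · rw [List.set_eq_of_length_le (by omega)]
    simp [hj]

theorem pvSumTakeSucc (d : List Int) (n : Nat) :
    (d.take (n + 1)).sum = (d.take n).sum + d.getD n 0 := by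
  induction d generalizing n with
  | nil => simp
  | cons a t ih =>
    cases n with
    | zero => simp
    | succ m => simp [List.take_succ_cons, ih m]; ring

theorem pvSumTakeAddAt (d : List Int) (j k : Nat) (v : Int) :
    ((pvAddAt d j v).take k).sum = (d.take k).sum + if j < k ∧ j < d.length then v else 0 := by
  induction d generalizing j k with
  | nil => simp [pvAddAt]
  | cons a t ih =>
    cases j with
    | zero =>
      cases k with
      | zero => simp [pvAddAt]
      | succ m =>
        simp [pvAddAt, List.take_succ_cons]
        ring
    | succ n =>
      cases k with
      | zero => simp [pvAddAt]
      | succ m =>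
        have : pvAddAt (a :: t) (n + 1) v = a :: pvAddAt t n v := by
          simp [pvAddAt, List.getD]
        rw [this]
        simp only [List.take_succ_cons, List.sum_cons, ih n m]
        have hc : (n + 1 < m + 1 ∧ n + 1 < (a :: t).length) ↔ (n < m ∧ n < t.length) := by
          simp
        rw [if_congr hc rfl rfl]
        split_ifs <;> ring

/-- A's innermost loop: each index in [lo, lo+n) gets v added (writes out of range are no-ops). -/
theorem pvAddLoop_getD (v : Int) : ∀ (n lo : Nat) (r : List Int) (i : Nat),
    ((List.range' lo n).foldl (fun r l => pvAddAt r l v) r).getD i 0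
      = r.getD i 0 + if lo ≤ i ∧ i < lo + n ∧ i < r.length then v else 0 := by
  intro n
  induction n with
  | zero => intro lo r i; simp; omega
  | succ m ih =>
    intro lo r i
    rw [List.range'_succ, List.foldl_cons, ih (lo + 1) (pvAddAt r lo v) i,
      pvAddAt_getD, pvAddAt_length]
    split_ifs <;> omega

theorem pvAddLoop_length (v : Int) (n lo : Nat) (r : List Int) :
    ((List.range' lo n).foldl (fun r l => pvAddAt r l v) r).length = r.length := by
  exact pvFoldlInv (fun s => s.length = r.length)
    (fun s l => pvAddAt s l v)
    (fun a c ha => by show (pvAddAt a c v).length = r.length; rw [pvAddAt_length]; exact ha) _ r rfl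

/-- B's prefix-sum loop computes the partial sums of d. -/
theorem pvPrefixFold (d : List Int) : ∀ (n : Nat),
    (List.range n).foldl (fun (p : List Int × Int) i => (p.1 ++ [p.2 + d.getD i 0], p.2 + d.getD i 0)) ([], 0)
      = ((List.range n).map (fun i => (d.take (i + 1)).sum), (d.take n).sum) := by
  intro n
  induction n with
  | zero => simp
  | succ m ih =>
    rw [List.range_succ, List.foldl_append, List.map_append, ih]
    simp [pvSumTakeSucc d m]

/-- the coupling invariant between A's accumulating array r and B's difference array d -/
def pvRel (M : Int) (d r : List Int) : Prop :=
  d.length = (M + 2).toNat ∧ r.length = (M + 1).toNat ∧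
    ∀ i, i < (M + 1).toNat → r.getD i 0 = (d.take (i + 1)).sum

theorem pvStepRel (M : Int) (hM : 0 ≤ M) (v : Int) (lo : Nat) (hi : Int) (hhi : hi ≤ M)
    (d r : List Int) (h : pvRel M d r) :
    pvRel M (if (lo : Int) ≤ hi then pvDiffAdd d lo (hi + 1).toNat v else d)
      ((List.range' lo ((hi + 1 - (lo : Int)).toNat)).foldl (fun r l => pvAddAt r l v) r) := by
  obtain ⟨hd, hr, hrel⟩ := h
  refine ⟨?_, ?_, ?_⟩
  · split_ifs with hc
    · simp [pvDiffAdd, pvAddAt_length, hd]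
    · exact hd
  · rw [pvAddLoop_length]; exact hr
  · intro i hi2
    rw [pvAddLoop_getD, hrel i hi2]
    by_cases hc : (lo : Int) ≤ hi
    · -- lo ≤ hi : both sides add v exactly on [lo, hi]
      rw [if_pos hc]
      simp only [pvDiffAdd, pvSumTakeAddAt, pvAddAt_length, hd, hr]
      split_ifs <;> omega
    · -- empty range on both sides
      rw [if_neg hc]
      split_ifs with h2
      · exfalso; omega
      · ring

theorem pvRel_init (M : Int) :
    pvRel M (List.replicate (M + 2).toNat 0) (List.replicate (M + 1).toNat 0) := by
  refine ⟨by simp, by simp, ?_⟩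
  intro i hi
  simp [hi, List.take_replicate]

-- ===== VERDICT (by name: the statement is the Claim_ definition above) =====
theorem DiagCGproductType_spec : Claim_equal_DiagCGproductType := by
  unfold Claim_equal_DiagCGproductType
  intro x y maxl _
  unfold Spec_DiagCGproductType DiagCGproductType DiagCGproductType_alt
  simp only []
  set M : Int := min (if maxl = -1 then (x.length : Int) + (y.length : Int) - 2 else maxl)
      ((x.length : Int) + (y.length : Int) - 2) with hM
  by_cases hneg : M < 0
  · -- M < 0: A's array is empty and stays empty; B returns []
    rw [if_pos hneg]
    have h0 : (M + 1).toNat = 0 := by omega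
    have hlen : ((List.range x.length).foldl (fun r (l1 : Nat) =>
        (List.range y.length).foldl (fun r (l2 : Nat) =>
          (List.range' (((l1 : Int) - (l2 : Int)).natAbs)
              ((min ((l1 : Int) + (l2 : Int)) M + 1 - ((((l1 : Int) - (l2 : Int)).natAbs : Int))).toNat)).foldl
            (fun r l => pvAddAt r l (x.getD l1 0)) r) r)
        (List.replicate (M + 1).toNat 0)).length = 0 := by
      refine pvFoldlInv (fun (r : List Int) => r.length = 0) _ ?_ _ _ (by simp [h0])
      intro r l1 hlen0
      refine pvFoldlInv (fun (r : List Int) => r.length = 0) _ ?_ _ _ hlen0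
      intro r l2 hlen0
      show ((List.range' _ _).foldl (fun r l => pvAddAt r l (x.getD l1 0)) r).length = 0
      rw [pvAddLoop_length]; exact hlen0
    exact List.eq_nil_of_length_eq_zero hlen
  · rw [not_lt] at hneg
    rw [if_neg (by omega)]
    -- couple the two double loops through pvRel
    have hrel : pvRel M
        ((List.range x.length).foldl (fun d (l1 : Nat) =>
          (List.range y.length).foldl (fun d (l2 : Nat) =>
            if ((((l1 : Int) - (l2 : Int)).natAbs : Int)) ≤ min ((l1 : Int) + (l2 : Int)) M then
              pvDiffAdd d (((l1 : Int) - (l2 : Int)).natAbs) (min ((l1 : Int) + (l2 : Int)) M + 1).toNat (x.getD l1 0)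
            else d) d) (List.replicate (M + 2).toNat 0))
        ((List.range x.length).foldl (fun r (l1 : Nat) =>
          (List.range y.length).foldl (fun r (l2 : Nat) =>
            (List.range' (((l1 : Int) - (l2 : Int)).natAbs)
                ((min ((l1 : Int) + (l2 : Int)) M + 1 - ((((l1 : Int) - (l2 : Int)).natAbs : Int))).toNat)).foldl
              (fun r l => pvAddAt r l (x.getD l1 0)) r) r)
          (List.replicate (M + 1).toNat 0)) := by
      refine pvFoldlRel (pvRel M) _ _ ?_ _ _ _ (pvRel_init M)
      intro d r l1 hdr
      refine pvFoldlRel (pvRel M) _ _ ?_ _ _ _ hdr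
      intro d r l2 hdr
      exact pvStepRel M hneg (x.getD l1 0) (((l1 : Int) - (l2 : Int)).natAbs)
        (min ((l1 : Int) + (l2 : Int)) M) (min_le_right _ _) d r hdr
    obtain ⟨hd, hr, hentry⟩ := hrel
    rw [pvPrefixFold]
    apply List.ext_getElem
    · simpa using hr
    · intro i h1 h2
      have hi : i < (M + 1).toNat := by simpa using h2
      rw [List.getElem_map, List.getElem_range]
      rw [← hentry i hi]
      exact (List.getD_eq_getElem _ 0 (by omega)).symm
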